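-- pv_equiv track=rewrite | github.com/DeV-ictor/PBL_TABULEIRO | module.py | even_validation
-- ===== SOURCE A (Python) =====
-- def even_validation(lists):
--
--     for item in lists:
--
--         check = []
--
--         for num in item:
--
--             if int(num) % 2 == 1:
--
--                 check.append(int(num))
--
--             else:
--
--                 break
--
--         if len(check) == len(item):
--
--             for i in range(len(item) - 1):
--
--                 if check[i] + 2 != check[i + 1]:
--
--                     break
--
--             else:
--
--                 return True
--
--     else:
--
--         return False
-- ===== SOURCE B (Python) =====
-- def even_validation(lists):
--     for item in lists:
--         if not item:
--             return True
--         start = item[0]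
--         if start % 2 == 1 and item == list(range(start, start + 2 * len(item), 2)):
--             return True
--     return False
-- ===== Notes on version B (the rewrite author's own statement) =====
-- stated objective: alternative
-- what changed: Instead of A's two scans per item (copy the odd prefix into `check`, then re-scan it by index comparing check[i]+2 with check[i+1]), B generates the expected arithmetic sequence list(range(item[0], item[0]+2*len(item), 2)) and accepts iff the item's first element is odd and the item equals that generated sequence (empty items are accepted directly).
import Mathlib
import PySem

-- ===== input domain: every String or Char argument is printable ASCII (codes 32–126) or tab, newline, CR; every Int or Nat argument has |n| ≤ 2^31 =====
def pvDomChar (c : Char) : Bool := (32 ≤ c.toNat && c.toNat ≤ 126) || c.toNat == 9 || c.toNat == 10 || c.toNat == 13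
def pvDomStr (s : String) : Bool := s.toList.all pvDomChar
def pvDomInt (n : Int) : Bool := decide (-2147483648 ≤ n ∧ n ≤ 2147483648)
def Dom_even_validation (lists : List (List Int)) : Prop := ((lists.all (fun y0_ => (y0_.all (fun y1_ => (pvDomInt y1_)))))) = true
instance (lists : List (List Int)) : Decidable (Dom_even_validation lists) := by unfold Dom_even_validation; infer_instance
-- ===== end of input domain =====

-- B: instead of A's two scans (copy odd prefix, then indexed +2 re-scan), each item is compared for equality with the generated sequence list(range(item[0], item[0]+2*len(item), 2)) with odd first element (alternative; same cost).


-- ===== PORT A =====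
-- inner collecting loop: append int(num) while odd, break at first even
def pvCheckA : List Int → List Int
  | [] => []
  | v :: rest => if PySem.Int.mod v 2 == 1 then v :: pvCheckA rest else []

-- 'for i in range(len(item)-1): if check[i]+2 != check[i+1]: break / else: True'
def pvConsecA (check : List Int) : List Nat → Bool
  | [] => true
  | i :: rest =>
      if check.getD i 0 + 2 != check.getD (i + 1) 0 then false
      else pvConsecA check rest

def even_validation : List (List Int) → Bool
  | [] => false
  | item :: rest =>
      let check := pvCheckA item
      if check.length == item.length then
        if pvConsecA check (List.range (item.length - 1)) then true
        else even_validation rest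
      else even_validation rest

-- ===== PORT B =====
-- 'if not item: return True; start = item[0];
--  if start % 2 == 1 and item == list(range(start, start + 2 * len(item), 2)): return True'
def even_validation_alt : List (List Int) → Bool
  | [] => false
  | item :: rest =>
      match item with
      | [] => true
      | start :: _ =>
          if (PySem.Int.mod start 2 == 1) &&
             (item == PySem.List.pyRange start (start + 2 * (item.length : Int)) 2) then true
          else even_validation_alt rest

-- ===== PRECONDITION & SPEC =====
def Spec_even_validation (lists : List (List Int)) (out : Bool) : Prop := out = even_validation_alt lists
instance (lists : List (List Int)) (out : Bool) : Decidable (Spec_even_validation lists out) := by unfold Spec_even_validation; infer_instance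

-- ===== CLAIM (what is proved, stated in full; the proofs are below) =====
def Claim_equal_even_validation : Prop := ∀ (lists : List (List Int)), Dom_even_validation lists → Spec_even_validation lists (even_validation lists)

-- ===== LEMMAS AND PROOFS =====

theorem pvCheckA_of_all_odd (item : List Int)
    (h : item.all (fun v => PySem.Int.mod v 2 == 1) = true) : pvCheckA item = item := by
  induction item with
  | nil => rfl
  | cons v rest ih =>
      rw [List.all_cons, Bool.and_eq_true] at h
      rw [pvCheckA, if_pos h.1, ih h.2]

theorem pvCheckA_len_ne (item : List Int)
    (h : item.all (fun v => PySem.Int.mod v 2 == 1) = false) :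
    (pvCheckA item).length ≠ item.length := by
  induction item with
  | nil => simp at h
  | cons v rest ih =>
      rw [List.all_cons, Bool.and_eq_false_iff] at h
      by_cases hv : (PySem.Int.mod v 2 == 1) = true
      · have hr := h.resolve_left (by rw [hv]; exact fun hc => absurd hc (by decide))
        rw [pvCheckA, if_pos hv, List.length_cons, List.length_cons]
        exact fun hc => ih hr (by omega)
      · rw [pvCheckA, if_neg hv]
        simp

theorem pvConsecA_shift (a : Int) (l : List Int) (idxs : List Nat) :
    pvConsecA (a :: l) (idxs.map Nat.succ) = pvConsecA l idxs := by
  induction idxs with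
  | nil => rfl
  | cons i rest ih =>
      rw [List.map_cons, pvConsecA, pvConsecA, List.getD_cons_succ, List.getD_cons_succ]
      rw [ih]

-- A's inner index scan says exactly: adjacent elements differ by 2
theorem pvConsecA_range (l : List Int) :
    pvConsecA l (List.range (l.length - 1)) =
      ((l.zip l.tail).all (fun p => p.2 - p.1 == 2)) := by
  induction l with
  | nil => rfl
  | cons a l ih =>
      cases l with
      | nil => rfl
      | cons b rest =>
          have hlen : (a :: b :: rest).length - 1 = rest.length + 1 := by simp
          have hlen2 : (b :: rest).length - 1 = rest.length := by simp
          rw [hlen, List.range_succ_eq_map, pvConsecA, List.getD_cons_zero,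
            List.getD_cons_succ, List.getD_cons_zero, pvConsecA_shift, ← hlen2, ih]
          simp only [List.tail_cons, List.zip_cons_cons, List.all_cons]
          by_cases h : (b - a == 2) = true
          · have h' : (a + 2 != b) = false := by
              have := beq_iff_eq.mp h
              simp only [bne_eq_false_iff_eq]; omega
            rw [h', if_neg (by simp), h, Bool.true_and]
          · have hb : (b - a == 2) = false := by simp at h; simp [h]
            have h' : (a + 2 != b) = true := by
              rw [bne_iff_ne]
              intro hc
              exact h (beq_iff_eq.mpr (by omega))
            rw [if_pos h', hb, Bool.false_and]

-- the arithmetic progression s, s+2, ..., s+2(n-1)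
def pvProg (s : Int) (n : Nat) : List Int := (List.range n).map (fun k : Nat => s + 2 * (k : Int))

theorem pvProg_succ (s : Int) (n : Nat) : pvProg s (n + 1) = s :: pvProg (s + 2) n := by
  unfold pvProg
  rw [List.range_succ_eq_map, List.map_cons, List.map_map]
  refine congrArg₂ _ (by norm_num) (List.map_congr_left (fun k _ => ?_))
  simp [Function.comp]
  ring

-- '+2-consecutive' coincides with being the arithmetic progression started at the head
theorem zip_consec_iff_prog (s : Int) (t : List Int) :
    (((s :: t).zip t).all (fun p => p.2 - p.1 == 2) = true) ↔
      s :: t = pvProg s (t.length + 1) := by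
  induction t generalizing s with
  | nil => simp [pvProg]
  | cons b r ih =>
      rw [pvProg_succ, List.length_cons, pvProg_succ]
      constructor
      · intro h
        simp only [List.zip_cons_cons, List.all_cons, Bool.and_eq_true, beq_iff_eq] at h
        have hb : b = s + 2 := by omega
        have h2 : b :: r = pvProg b (r.length + 1) :=
          (ih b).mp h.2
        rw [List.cons_eq_cons]
        refine ⟨rfl, ?_⟩
        rw [← hb, h2, pvProg_succ, hb]
      · intro h
        rw [List.cons_eq_cons] at h
        obtain ⟨-, ht⟩ := h
        have hb : b = s + 2 := by
          have := congrArg (fun l => l.headD 0) ht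
          simpa [pvProg_succ] using this
        have hz : ((b :: r).zip r).all (fun p => p.2 - p.1 == 2) = true :=
          (ih b).mpr (by rw [ht, hb, pvProg_succ, ← hb])
        simp only [List.zip_cons_cons, List.all_cons, Bool.and_eq_true, beq_iff_eq] at hz ⊢
        exact ⟨by omega, hz⟩

-- on the nonempty progression starting at s, all elements are odd iff s is odd
theorem all_odd_prog (s : Int) (m : Nat) :
    (pvProg s (m + 1)).all (fun v => PySem.Int.mod v 2 == 1)
      = (PySem.Int.mod s 2 == 1) := by
  rw [Bool.eq_iff_iff]
  constructor
  · intro h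
    have hs : s ∈ pvProg s (m + 1) := by rw [pvProg_succ]; exact List.mem_cons_self
    exact List.all_eq_true.mp h s hs
  · intro h
    rw [List.all_eq_true]
    intro v hv
    unfold pvProg at hv
    rw [List.mem_map] at hv
    obtain ⟨k, -, rfl⟩ := hv
    have hmod : PySem.Int.mod (s + 2 * (k : Int)) 2 = PySem.Int.mod s 2 := by
      simp [PySem.Int.mod]
    show (PySem.Int.mod (s + 2 * (k : Int)) 2 == 1) = true
    rw [hmod]
    exact h

-- B's per-item test equals A's per-item test, for a nonempty item
theorem item_cond_eq (s : Int) (t : List Int) :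
    (((s :: t).all (fun v => PySem.Int.mod v 2 == 1)) &&
      (((s :: t).zip t).all (fun p => p.2 - p.1 == 2)))
    = ((PySem.Int.mod s 2 == 1) &&
       ((s :: t) == PySem.List.pyRange s (s + 2 * (((s :: t).length : Nat) : Int)) 2)) := by
  have hpr : PySem.List.pyRange s (s + 2 * (((s :: t).length : Nat) : Int)) 2
      = pvProg s (t.length + 1) := by
    rw [PySem.List.pyRange_of_pos _ _ (by norm_num : (0:Int) < 2)]
    have hlen : (((s :: t).length : Nat) : Int) = (t.length : Int) + 1 := by simp
    have hif : (if s < s + 2 * (((s :: t).length : Nat) : Int) then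
        ((s + 2 * (((s :: t).length : Nat) : Int) - s + 2 - 1) / 2).toNat else 0)
        = t.length + 1 := by
      rw [if_pos (by rw [hlen]; omega), hlen]
      omega
    rw [hif]
    rfl
  rw [hpr, Bool.eq_iff_iff]
  simp only [Bool.and_eq_true, beq_iff_eq]
  constructor
  · rintro ⟨hall, hz⟩
    refine ⟨?_, (zip_consec_iff_prog s t).mp hz⟩
    exact beq_iff_eq.mp (List.all_eq_true.mp hall s List.mem_cons_self)
  · rintro ⟨hs, heq⟩
    refine ⟨?_, (zip_consec_iff_prog s t).mpr heq⟩
    rw [heq, all_odd_prog]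
    exact beq_iff_eq.mpr hs

theorem even_validation_eq_alt (lists : List (List Int)) :
    even_validation lists = even_validation_alt lists := by
  induction lists with
  | nil => rfl
  | cons item rest ih =>
      cases item with
      | nil =>
          rw [even_validation, even_validation_alt]
          simp [pvCheckA, pvConsecA]
      | cons s t =>
          rw [even_validation, even_validation_alt, ← ih]
          have hcond := item_cond_eq s t
          by_cases hodd : ((s :: t).all (fun v => PySem.Int.mod v 2 == 1)) = true
          · rw [hodd, Bool.true_and] at hcond
            simp only [pvCheckA_of_all_odd _ hodd, beq_self_eq_true, if_true,
              pvConsecA_range, List.tail_cons, ← hcond]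
          · rw [Bool.not_eq_true] at hodd
            rw [hodd, Bool.false_and] at hcond
            have hne : ((pvCheckA (s :: t)).length == (s :: t).length) = false := by
              simp only [beq_eq_false_iff_ne, ne_eq]
              exact pvCheckA_len_ne _ hodd
            simp only [hne, Bool.false_eq_true, if_false, ← hcond]

-- ===== VERDICT (by name: the statement is the Claim_ definition above) =====
theorem even_validation_spec : Claim_equal_even_validation := by
  intro lists _
  unfold Spec_even_validation
  exact even_validation_eq_alt lists
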